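-- pv_equiv track=rewrite | github.com/ganadara135/CorridorRoad | freecad/Corridor_Road/objects/obj_typical_section_template.py | _split_rows_by_side
-- ===== SOURCE A (Python) =====
-- def _split_rows_by_side(rows):
--     left = []
--     right = []
--     center = []
--     for row in rows:
--         if not bool(row.get("Enabled", True)):
--             continue
--         side = str(row.get("Side", "") or "").strip().lower()
--         if side == "left":
--             left.append(row)
--         elif side == "right":
--             right.append(row)
--         elif side == "center":
--             center.append(row)
--         elif side == "both":
--             lrow = dict(row)
--             lrow["Side"] = "left"
--             rrow = dict(row)
--             rrow["Side"] = "right"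
--             left.append(lrow)
--             right.append(rrow)
--     left.sort(key=lambda r: (int(r.get("Order", 0) or 0), str(r.get("Id", ""))))
--     right.sort(key=lambda r: (int(r.get("Order", 0) or 0), str(r.get("Id", ""))))
--     center.sort(key=lambda r: (int(r.get("Order", 0) or 0), str(r.get("Id", ""))))
--     return left, center, right
-- ===== SOURCE B (Python) =====
-- def _split_rows_by_side(rows):
--     # One combined pass + ONE stable sort, then distribute by (normalized) side.
--     combined = []
--     for row in rows:
--         if not bool(row.get("Enabled", True)):
--             continue
--         side = str(row.get("Side", "") or "").strip().lower()
--         if side in ("left", "right", "center"):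
--             combined.append(row)
--         elif side == "both":
--             lrow = dict(row)
--             lrow["Side"] = "left"
--             rrow = dict(row)
--             rrow["Side"] = "right"
--             combined.append(lrow)
--             combined.append(rrow)
--     combined.sort(key=lambda r: (int(r.get("Order", 0) or 0), str(r.get("Id", ""))))
--     left = []
--     right = []
--     center = []
--     for r in combined:
--         s = str(r.get("Side", "") or "").strip().lower()
--         if s == "left":
--             left.append(r)
--         elif s == "center":
--             center.append(r)
--         elif s == "right":
--             right.append(r)
--     return left, center, right
-- ===== Notes on version B (the rewrite author's own statement) =====
-- stated objective: alternative
-- what changed: A partitions rows into three buckets during the scan and sorts each bucket separately; B builds one combined list of the kept (normalized, 'both'-duplicated) rows, sorts it once with the same (Order, Id) key, and then distributes the stably sorted rows to left/center/right in a second pass; equality of the per-side orders rests on sort stability.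
import Mathlib
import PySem

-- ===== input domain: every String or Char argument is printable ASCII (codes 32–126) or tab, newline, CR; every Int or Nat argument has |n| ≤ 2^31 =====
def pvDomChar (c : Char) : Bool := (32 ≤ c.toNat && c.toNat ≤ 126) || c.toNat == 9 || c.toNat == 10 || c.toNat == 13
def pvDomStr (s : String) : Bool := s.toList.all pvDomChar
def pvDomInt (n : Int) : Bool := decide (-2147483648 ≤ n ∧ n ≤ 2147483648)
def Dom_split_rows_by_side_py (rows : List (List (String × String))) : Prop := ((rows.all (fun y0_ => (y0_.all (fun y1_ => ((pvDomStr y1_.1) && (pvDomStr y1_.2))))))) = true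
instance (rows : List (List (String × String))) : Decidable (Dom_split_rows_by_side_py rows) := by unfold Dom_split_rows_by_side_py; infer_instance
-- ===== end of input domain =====

-- B replaces A's three separately-sorted buckets by one combined filtered list, ONE stable
-- sort of it, and a second pass distributing the sorted rows to left/center/right (objective:
-- alternative decomposition; same results by stability of Python's sort).

-- ===== PORT A =====
-- shared row primitives (the same Python expressions occur verbatim in both A and B)
-- row.get(k) : first-match lookup in the association list representing the dict
def pvRget (row : List (String × String)) (k : String) : Option String :=
  (PySem.Dict.mk row).get? k

-- bool(row.get("Enabled", True))
def pvEnabled (row : List (String × String)) : Bool :=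
  match pvRget row "Enabled" with
  | none => true
  | some s => s != ""

-- str(row.get("Side", "") or "").strip().lower()
def pvSide (row : List (String × String)) : String :=
  PySem.Str.lower (PySem.Str.strip ((pvRget row "Side").getD ""))

-- dict(row) copy followed by row["Side"] = v
def pvSetSide (row : List (String × String)) (v : String) : List (String × String) :=
  ((PySem.Dict.mk row).insert "Side" v).items

-- sort key component int(r.get("Order", 0) or 0); total here, Pre_ excludes the ValueError inputs
def pvOrderKey (row : List (String × String)) : Int :=
  match pvRget row "Order" with
  | none => 0
  | some s => if s == "" then 0 else (PySem.Int.ofStr? s).getD 0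

-- sort key component str(r.get("Id", ""))
def pvIdKey (row : List (String × String)) : String :=
  (pvRget row "Id").getD ""

-- the body of A's for-loop; accumulator = (left, right, center)
def pvStepA (acc : (List (List (String × String))) × (List (List (String × String))) × (List (List (String × String))))
    (row : List (String × String)) :
    (List (List (String × String))) × (List (List (String × String))) × (List (List (String × String))) :=
  if !(pvEnabled row) then acc
  else
    let side := pvSide row
    if side == "left" then (acc.1 ++ [row], acc.2.1, acc.2.2)
    else if side == "right" then (acc.1, acc.2.1 ++ [row], acc.2.2)
    else if side == "center" then (acc.1, acc.2.1, acc.2.2 ++ [row])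
    else if side == "both" then (acc.1 ++ [pvSetSide row "left"], acc.2.1 ++ [pvSetSide row "right"], acc.2.2)
    else acc

def split_rows_by_side_py (rows : List (List (String × String))) : (List (List (String × String))) × (List (List (String × String))) × (List (List (String × String))) :=
  (PySem.List.sorted2 (rows.foldl pvStepA ([], [], [])).1 pvOrderKey pvIdKey,
   PySem.List.sorted2 (rows.foldl pvStepA ([], [], [])).2.2 pvOrderKey pvIdKey,
   PySem.List.sorted2 (rows.foldl pvStepA ([], [], [])).2.1 pvOrderKey pvIdKey)

-- ===== PORT B =====
-- the body of B's first loop: one combined list of the kept (normalised) rows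
def pvCombineStep (acc : List (List (String × String))) (row : List (String × String)) :
    List (List (String × String)) :=
  if !(pvEnabled row) then acc
  else
    let side := pvSide row
    if side == "left" || side == "right" || side == "center" then acc ++ [row]
    else if side == "both" then acc ++ [pvSetSide row "left", pvSetSide row "right"]
    else acc

-- the body of B's second loop; accumulator = (left, center, right)
def pvDistStep (acc : (List (List (String × String))) × (List (List (String × String))) × (List (List (String × String))))
    (r : List (String × String)) :
    (List (List (String × String))) × (List (List (String × String))) × (List (List (String × String))) :=
  let s := pvSide r
  if s == "left" then (acc.1 ++ [r], acc.2.1, acc.2.2)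
  else if s == "center" then (acc.1, acc.2.1 ++ [r], acc.2.2)
  else if s == "right" then (acc.1, acc.2.1, acc.2.2 ++ [r])
  else acc

def split_rows_by_side_py_alt (rows : List (List (String × String))) : (List (List (String × String))) × (List (List (String × String))) × (List (List (String × String))) :=
  (PySem.List.sorted2 (rows.foldl pvCombineStep []) pvOrderKey pvIdKey).foldl pvDistStep ([], [], [])

-- ===== PRECONDITION & SPEC =====
-- int(r.get("Order", 0) or 0) is evaluated by the sort key on every kept row
def pvOrderOk (row : List (String × String)) : Bool :=
  match pvRget row "Order" with
  | none => true
  | some s => (s == "") || (PySem.Int.ofStr? s).isSome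

-- Pre_ excludes exactly the inputs on which Python A raises ValueError: some enabled row with a
-- recognised Side ("left"/"right"/"center"/"both") whose nonempty "Order" value is not int-parsable.
def Pre_split_rows_by_side_py (rows : List (List (String × String))) : Prop :=
  (rows.all fun r =>
    !(pvEnabled r && (pvSide r == "left" || pvSide r == "right" || pvSide r == "center" || pvSide r == "both"))
      || pvOrderOk r) = true

instance (rows : List (List (String × String))) : Decidable (Pre_split_rows_by_side_py rows) := by
  unfold Pre_split_rows_by_side_py; infer_instance

def pvWitness_split_rows_by_side_py : (List (List (String × String))) :=
  [[("Side", " Both"), ("Order", "2"), ("Id", "a")], [("Side", "left"), ("Enabled", "1")]]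

def Spec_split_rows_by_side_py (rows : List (List (String × String))) (out : (List (List (String × String))) × (List (List (String × String))) × (List (List (String × String)))) : Prop := out = split_rows_by_side_py_alt rows
instance (rows : List (List (String × String))) (out : (List (List (String × String))) × (List (List (String × String))) × (List (List (String × String)))) : Decidable (Spec_split_rows_by_side_py rows out) := by unfold Spec_split_rows_by_side_py; infer_instance

-- ===== CLAIM (what is proved, stated in full; the proofs are below) =====
def Claim_equal_split_rows_by_side_py : Prop := ∀ (rows : List (List (String × String))), Dom_split_rows_by_side_py rows → Pre_split_rows_by_side_py rows → Spec_split_rows_by_side_py rows (split_rows_by_side_py rows)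

-- ===== LEMMAS AND PROOFS =====

-- the comparison sorted2 sorts by: Python's lexicographic "(k1, k2) <" as a Bool
def pvLt2 {α : Type} (k1 : α → Int) (k2 : α → String) (a b : α) : Bool :=
  decide (k1 a < k1 b) || (!decide (k1 b < k1 a) && decide (k2 a < k2 b))

lemma pvLt2_prop {α : Type} (k1 : α → Int) (k2 : α → String) (a b : α) :
    pvLt2 k1 k2 a b = true ↔ (k1 a < k1 b ∨ (¬ k1 b < k1 a ∧ k2 a < k2 b)) := by
  simp [pvLt2]

lemma pvLt2_false {α : Type} (k1 : α → Int) (k2 : α → String) (a b : α) :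
    pvLt2 k1 k2 a b = false ↔ (¬ k1 a < k1 b ∧ (k1 b < k1 a ∨ ¬ k2 a < k2 b)) := by
  rw [← Bool.not_eq_true, pvLt2_prop]
  constructor
  · intro h
    by_cases h1 : k1 a < k1 b
    · exact absurd (Or.inl h1) h
    · refine ⟨h1, ?_⟩
      by_cases h2 : k1 b < k1 a
      · exact Or.inl h2
      · exact Or.inr (fun hk2 => h (Or.inr ⟨h2, hk2⟩))
  · rintro ⟨h1, h2⟩ (h | ⟨h3, h4⟩)
    · exact h1 h
    · rcases h2 with h2 | h2
      · exact h3 h2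
      · exact h2 h4

lemma pvLt2_asymm {α : Type} (k1 : α → Int) (k2 : α → String) (a b : α)
    (h : pvLt2 k1 k2 a b = true) : pvLt2 k1 k2 b a = false := by
  rw [pvLt2_prop] at h; rw [pvLt2_false]
  rcases h with h | ⟨h1, h2⟩
  · exact ⟨lt_asymm h, Or.inl h⟩
  · exact ⟨h1, Or.inr (lt_asymm h2)⟩

lemma pvLt2_trans {α : Type} (k1 : α → Int) (k2 : α → String) (a b c : α)
    (hab : pvLt2 k1 k2 a b = true) (hbc : pvLt2 k1 k2 b c = true) : pvLt2 k1 k2 a c = true := by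
  rw [pvLt2_prop] at hab hbc ⊢
  rcases hab with h | ⟨h1, h2⟩ <;> rcases hbc with h' | ⟨h1', h2'⟩
  · exact Or.inl (lt_trans h h')
  · exact Or.inl (lt_of_lt_of_le h (not_lt.mp h1'))
  · exact Or.inl (lt_of_le_of_lt (not_lt.mp h1) h')
  · refine Or.inr ⟨?_, lt_trans h2 h2'⟩
    exact not_lt.mpr (le_trans (not_lt.mp h1) (not_lt.mp h1'))

-- x strictly before y and z not strictly before y imply x strictly before z
lemma pvLt2_trans2 {α : Type} (k1 : α → Int) (k2 : α → String) (a b c : α)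
    (hab : pvLt2 k1 k2 a b = true) (hcb : pvLt2 k1 k2 c b = false) : pvLt2 k1 k2 a c = true := by
  rw [pvLt2_prop] at hab ⊢; rw [pvLt2_false] at hcb
  obtain ⟨hc1, hc2⟩ := hcb
  have hbc : k1 b ≤ k1 c := not_lt.mp hc1
  rcases hab with h | ⟨h1, h2⟩
  · exact Or.inl (lt_of_lt_of_le h hbc)
  · have hab' : k1 a ≤ k1 b := not_lt.mp h1
    by_cases hac : k1 a < k1 c
    · exact Or.inl hac
    · have hca : k1 c ≤ k1 a := not_lt.mp hac
      have hnbc : ¬ k1 b < k1 c := not_lt.mpr (le_trans hca hab')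
      have hcb2 : ¬ k2 c < k2 b := hc2.resolve_left hnbc
      refine Or.inr ⟨not_lt.mpr (le_trans hab' hbc), lt_of_lt_of_le h2 (not_lt.mp hcb2)⟩

-- insertBy puts x at the head when x is strictly before everything
lemma pv_insertBy_all_before {α : Type} (before : α → α → Bool) (x : α) (l : List α)
    (h : ∀ z ∈ l, before x z = true) : PySem.List.insertBy before x l = x :: l := by
  cases l with
  | nil => simp [PySem.List.insertBy]
  | cons z zs => simp [PySem.List.insertBy, h z List.mem_cons_self]

-- the sortedness invariant "no later element is strictly before an earlier one" is kept by insertBy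
lemma pv_insertBy_pairwise {α : Type} (before : α → α → Bool)
    (hasym : ∀ a b, before a b = true → before b a = false)
    (htrans : ∀ a b c, before a b = true → before b c = true → before a c = true)
    (x : α) : ∀ (ys : List α), ys.Pairwise (fun a b => before b a = false) →
    (PySem.List.insertBy before x ys).Pairwise (fun a b => before b a = false) := by
  intro ys
  induction ys with
  | nil => intro _; simp [PySem.List.insertBy]
  | cons y ys ih =>
    intro h
    obtain ⟨h1, h2⟩ := List.pairwise_cons.mp h
    by_cases hxy : before x y = true
    · have : PySem.List.insertBy before x (y :: ys) = x :: y :: ys := by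
        simp [PySem.List.insertBy, hxy]
      rw [this]
      refine List.Pairwise.cons ?_ h
      intro z hz
      rcases List.mem_cons.mp hz with rfl | hz'
      · exact hasym _ _ hxy
      · cases hzx : before z x with
        | false => rfl
        | true => exact absurd (htrans z x y hzx hxy) (by simp [h1 z hz'])
    · rw [Bool.not_eq_true] at hxy
      have : PySem.List.insertBy before x (y :: ys) = y :: PySem.List.insertBy before x ys := by
        simp [PySem.List.insertBy, hxy]
      rw [this]
      refine List.Pairwise.cons ?_ (ih h2)
      intro w hw
      rcases (PySem.List.mem_insertBy _ _ _ _).mp hw with rfl | hw'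
      · exact hxy
      · exact h1 w hw'

-- filter commutes with a stable insertion into an already-sorted list
lemma pv_filter_insertBy {α : Type} (before : α → α → Bool) (p : α → Bool)
    (htrans2 : ∀ a b c, before a b = true → before c b = false → before a c = true)
    (x : α) : ∀ (ys : List α), ys.Pairwise (fun a b => before b a = false) →
    (PySem.List.insertBy before x ys).filter p =
      if p x then PySem.List.insertBy before x (ys.filter p) else ys.filter p := by
  intro ys
  induction ys with
  | nil =>
    intro _
    cases hp : p x <;> simp [PySem.List.insertBy, hp]
  | cons y ys ih =>
    intro h
    obtain ⟨h1, h2⟩ := List.pairwise_cons.mp h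
    by_cases hxy : before x y = true
    · have hins : PySem.List.insertBy before x (y :: ys) = x :: y :: ys := by
        simp [PySem.List.insertBy, hxy]
      rw [hins]
      cases hp : p x with
      | false => simp [List.filter_cons, hp]
      | true =>
        cases hq : p y with
        | true => simp [List.filter_cons, hp, hq, PySem.List.insertBy, hxy]
        | false =>
          have hall : ∀ z ∈ ys.filter p, before x z = true := by
            intro z hz
            exact htrans2 x y z hxy (h1 z (List.mem_of_mem_filter hz))
          simp [List.filter_cons, hp, hq, pv_insertBy_all_before before x _ hall]
    · rw [Bool.not_eq_true] at hxy
      have hins : PySem.List.insertBy before x (y :: ys) = y :: PySem.List.insertBy before x ys := by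
        simp [PySem.List.insertBy, hxy]
      rw [hins]
      have ihh := ih h2
      cases hp : p x with
      | false =>
        rw [if_neg (by simp [hp])] at ihh
        cases hq : p y <;> simp [List.filter_cons, hq, ihh, hp]
      | true =>
        rw [if_pos hp] at ihh
        cases hq : p y with
        | false => simp [List.filter_cons, hq, ihh]
        | true => simp [List.filter_cons, hq, ihh, PySem.List.insertBy, hxy]

-- filter commutes with the whole insertion-sort fold
lemma pv_filter_foldl {α : Type} (before : α → α → Bool) (p : α → Bool)
    (hasym : ∀ a b, before a b = true → before b a = false)
    (htrans : ∀ a b c, before a b = true → before b c = true → before a c = true)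
    (htrans2 : ∀ a b c, before a b = true → before c b = false → before a c = true) :
    ∀ (l acc : List α), acc.Pairwise (fun a b => before b a = false) →
    (l.foldl (fun a x => PySem.List.insertBy before x a) acc).filter p =
      (l.filter p).foldl (fun a x => PySem.List.insertBy before x a) (acc.filter p) := by
  intro l
  induction l with
  | nil => intro acc _; simp
  | cons x l ih =>
    intro acc hacc
    have hpair := pv_insertBy_pairwise before hasym htrans x acc hacc
    have hstep := pv_filter_insertBy before p htrans2 x acc hacc
    rw [List.foldl_cons, ih _ hpair, hstep]
    cases hp : p x <;> simp [List.filter_cons, hp]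

lemma pv_sorted2_eq {α : Type} (xs : List α) (k1 : α → Int) (k2 : α → String) :
    PySem.List.sorted2 xs k1 k2 =
      xs.foldl (fun acc x => PySem.List.insertBy (pvLt2 k1 k2) x acc) [] := rfl

-- the key fact: filtering a stably sorted list = stably sorting the filtered list
lemma pv_filter_sorted2 {α : Type} (k1 : α → Int) (k2 : α → String) (p : α → Bool) (xs : List α) :
    (PySem.List.sorted2 xs k1 k2).filter p = PySem.List.sorted2 (xs.filter p) k1 k2 := by
  rw [pv_sorted2_eq, pv_sorted2_eq]
  have := pv_filter_foldl (pvLt2 k1 k2) p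
    (pvLt2_asymm k1 k2 · ·) (pvLt2_trans k1 k2 · · ·) (pvLt2_trans2 k1 k2 · · ·)
    xs [] List.Pairwise.nil
  simpa using this

-- what one row contributes to the combined list
def pvG (row : List (String × String)) : List (List (String × String)) :=
  if !(pvEnabled row) then []
  else if pvSide row == "left" || pvSide row == "right" || pvSide row == "center" then [row]
  else if pvSide row == "both" then [pvSetSide row "left", pvSetSide row "right"]
  else []

def pvPL (r : List (String × String)) : Bool := pvSide r == "left"
def pvPC (r : List (String × String)) : Bool := pvSide r == "center"
def pvPR (r : List (String × String)) : Bool := pvSide r == "right"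

lemma pv_side_setSide (row : List (String × String)) (v : String) :
    pvSide (pvSetSide row v) = PySem.Str.lower (PySem.Str.strip v) := by
  have hmk : ∀ (d : PySem.Dict String String), PySem.Dict.mk d.items = d := fun _ => rfl
  unfold pvSide pvRget pvSetSide
  rw [hmk, PySem.Dict.get?_insert_self]
  rfl

lemma pv_stepA_eq (L R C : List (List (String × String))) (row : List (String × String)) :
    pvStepA (L, R, C) row =
      (L ++ (pvG row).filter pvPL, R ++ (pvG row).filter pvPR, C ++ (pvG row).filter pvPC) := by
  cases he : pvEnabled row with
  | false => simp [pvStepA, pvG, he]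
  | true =>
    by_cases h1 : pvSide row = "left"
    · simp [pvStepA, pvG, pvPL, pvPR, pvPC, he, h1]
    · by_cases h2 : pvSide row = "right"
      · simp [pvStepA, pvG, pvPL, pvPR, pvPC, he, h1, h2]
      · by_cases h3 : pvSide row = "center"
        · simp [pvStepA, pvG, pvPL, pvPR, pvPC, he, h1, h2, h3]
        · by_cases h4 : pvSide row = "both"
          · have el : pvPL (pvSetSide row "left") = true := by
              simp only [pvPL, pv_side_setSide]; decide
            have el2 : pvPR (pvSetSide row "left") = false := by
              simp only [pvPR, pv_side_setSide]; decide
            have el3 : pvPC (pvSetSide row "left") = false := by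
              simp only [pvPC, pv_side_setSide]; decide
            have er : pvPR (pvSetSide row "right") = true := by
              simp only [pvPR, pv_side_setSide]; decide
            have er2 : pvPL (pvSetSide row "right") = false := by
              simp only [pvPL, pv_side_setSide]; decide
            have er3 : pvPC (pvSetSide row "right") = false := by
              simp only [pvPC, pv_side_setSide]; decide
            simp [pvStepA, pvG, he, h1, h2, h3, h4, List.filter_cons, el, el2, el3, er, er2, er3]
          · simp [pvStepA, pvG, he, h1, h2, h3, h4]

lemma pv_loopA : ∀ (rows : List (List (String × String))) (L R C : List (List (String × String))),
    rows.foldl pvStepA (L, R, C) =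
      (L ++ ((rows.flatMap pvG).filter pvPL),
       R ++ ((rows.flatMap pvG).filter pvPR),
       C ++ ((rows.flatMap pvG).filter pvPC)) := by
  intro rows
  induction rows with
  | nil => intro L R C; simp
  | cons row rest ih =>
    intro L R C
    simp only [List.foldl_cons, List.flatMap_cons, List.filter_append]
    rw [pv_stepA_eq, ih]
    simp [List.append_assoc]

lemma pv_combine_eq (rows : List (List (String × String))) :
    rows.foldl pvCombineStep [] = rows.flatMap pvG := by
  have hstep : ∀ (acc : List (List (String × String))) (row : List (String × String)),
      pvCombineStep acc row = acc ++ pvG row := by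
    intro acc row
    cases he : pvEnabled row with
    | false => simp [pvCombineStep, pvG, he]
    | true =>
      by_cases h1 : (pvSide row == "left" || pvSide row == "right" || pvSide row == "center") = true
      · simp [pvCombineStep, pvG, he, h1]
      · by_cases h4 : pvSide row = "both"
        · simp [pvCombineStep, pvG, he, h1, h4]
        · simp [pvCombineStep, pvG, he, h1, h4]
  calc rows.foldl pvCombineStep []
      = rows.foldl (fun acc row => acc ++ pvG row) [] :=
        PySem.List.foldl_congr_mem _ _ _ _ (fun acc x _ => hstep acc x)
    _ = rows.flatMap pvG := by
        rw [PySem.List.foldl_append_eq_flatMap]; simp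

lemma pv_mem_G (row r : List (String × String)) (h : r ∈ pvG row) :
    (pvPL r || pvPC r || pvPR r) = true := by
  unfold pvG at h
  split_ifs at h with h0 h1 h2
  · simp at h
  · rw [List.mem_singleton] at h
    subst h
    rw [Bool.or_eq_true, Bool.or_eq_true] at h1 ⊢
    rcases h1 with (h | h) | h
    · exact Or.inl (Or.inl h)
    · exact Or.inr h
    · exact Or.inl (Or.inr h)
  · rcases List.mem_cons.mp h with rfl | h'
    · rw [Bool.or_eq_true, Bool.or_eq_true]
      exact Or.inl (Or.inl (by simp only [pvPL, pv_side_setSide]; decide))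
    · rw [List.mem_singleton] at h'
      subst h'
      rw [Bool.or_eq_true]
      exact Or.inr (by simp only [pvPR, pv_side_setSide]; decide)
  · simp at h

lemma pv_loopB : ∀ (l : List (List (String × String))),
    (∀ r ∈ l, (pvPL r || pvPC r || pvPR r) = true) →
    ∀ (L C R : List (List (String × String))),
    l.foldl pvDistStep (L, C, R) = (L ++ l.filter pvPL, C ++ l.filter pvPC, R ++ l.filter pvPR) := by
  intro l
  induction l with
  | nil => intro _ L C R; simp
  | cons r rest ih =>
    intro h L C R
    have hr := h r List.mem_cons_self
    have hrest : ∀ x ∈ rest, (pvPL x || pvPC x || pvPR x) = true :=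
      fun x hx => h x (List.mem_cons_of_mem r hx)
    simp only [List.foldl_cons]
    by_cases h1 : pvSide r = "left"
    · have hstep : pvDistStep (L, C, R) r = (L ++ [r], C, R) := by simp [pvDistStep, h1]
      rw [hstep, ih hrest]
      simp [List.filter_cons, pvPL, pvPC, pvPR, h1, List.append_assoc]
    · by_cases h2 : pvSide r = "center"
      · have hstep : pvDistStep (L, C, R) r = (L, C ++ [r], R) := by simp [pvDistStep, h1, h2]
        rw [hstep, ih hrest]
        simp [List.filter_cons, pvPL, pvPC, pvPR, h1, h2, List.append_assoc]
      · by_cases h3 : pvSide r = "right"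
        · have hstep : pvDistStep (L, C, R) r = (L, C, R ++ [r]) := by simp [pvDistStep, h1, h2, h3]
          rw [hstep, ih hrest]
          simp [List.filter_cons, pvPL, pvPC, pvPR, h1, h2, h3, List.append_assoc]
        · exfalso
          simp only [pvPL, pvPC, pvPR, Bool.or_eq_true, beq_iff_eq] at hr
          rcases hr with (h | h) | h
          · exact h1 h
          · exact h2 h
          · exact h3 h

-- ===== VERDICT (by name: the statement is the Claim_ definition above) =====
theorem split_rows_by_side_py_spec : Claim_equal_split_rows_by_side_py := by
  intro rows _ _
  show split_rows_by_side_py rows = split_rows_by_side_py_alt rows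
  unfold split_rows_by_side_py split_rows_by_side_py_alt
  rw [pv_combine_eq]
  have hmem : ∀ r ∈ PySem.List.sorted2 (rows.flatMap pvG) pvOrderKey pvIdKey,
      (pvPL r || pvPC r || pvPR r) = true := by
    intro r hr
    replace hr := (PySem.List.sorted2_perm _ _ _ _).mem_iff.mp hr
    rcases List.mem_flatMap.mp hr with ⟨row, _, hmem⟩
    exact pv_mem_G row r hmem
  rw [pv_loopB _ hmem [] [] [], pv_loopA]
  simp only [List.nil_append]
  rw [pv_filter_sorted2, pv_filter_sorted2, pv_filter_sorted2]
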